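/- GENERATED by c/gen_code.py from toyh.elf, the PROGRAM only (the base is in the shared library): the code of each function as a byte list.
   The address in a comment is where the function stood in that file; no definition depends on it. -/
import UserX.Code
namespace Toyh.Code

-- prog_main: 89 bytes, at 0x105000
#code_bytes code_prog_main
  "415455534989fc4889f7488b05efc803004883c001488905e4c80300e8bf0000"
  "004889c34889c7e8d4e1ffff4885c074214889c54889da4c89e64889c7e8fec3"
  "ffff4889efe8b6e7ffff4889d85b5d415cc3bb00000000ebf1"

-- clamp_length: 27 bytes, at 0x1050e0
#code_bytes code_clamp_length
  "4885ff780a4883ff407f0a4889f8c3b800000000c3b840000000c3"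

-- _sub_I_65535_1: 24 bytes, at 0x105180
#code_bytes code__sub_I_65535_1
  "4883ec08be01000000bf40161400e8cdbbffff4883c408c3"

end Toyh.Code
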